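-- pv_equiv track=rewrite | github.com/keppangithub/spotifeel | API/emotionAPI.py | negated_feeling_str
-- ===== SOURCE A (Python) =====
-- def negated_feeling_str(emotion: str) -> str:
--     '''
--     Check which category the emotion received is a part of, and return the opposit emotion.
--
--     Args:
--         emotion (str): an emotion name
--
--     Returns:
--         str: an emotion name or 'unknown' (if the emotion is not found).
--     '''
--     emotions_categories = {
--         "happy": ["euphoric", "loving", "happy", "Euphoric", "Loving", "Happy"],
--         "angry": ["furious", "frustrated", "Furious", "Frustrated"],
--         "sad": ["horrified", "disappointed", "useless", "regretful", "dejected", "unhappy", "scared", "anxious", "Horrified", "Disappointed", "Useless", "Regretful", "Dejected", "Unhappy", "Scared", "Anxious"]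
--     }
--
--     for category, emotion_list in emotions_categories.items():
--         if emotion in emotion_list:
--             if category == "happy":
--                 return "sad"
--
--             if category == "angry":
--                 return "chill"
--
--             if category == "sad":
--                 return "happy"
--
--     return "unknown"
-- ===== SOURCE B (Python) =====
-- _OPPOSITE = {
--     "euphoric": "sad", "loving": "sad", "happy": "sad",
--     "Euphoric": "sad", "Loving": "sad", "Happy": "sad",
--     "furious": "chill", "frustrated": "chill",
--     "Furious": "chill", "Frustrated": "chill",
--     "horrified": "happy", "disappointed": "happy", "useless": "happy",
--     "regretful": "happy", "dejected": "happy", "unhappy": "happy",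
--     "scared": "happy", "anxious": "happy",
--     "Horrified": "happy", "Disappointed": "happy", "Useless": "happy",
--     "Regretful": "happy", "Dejected": "happy", "Unhappy": "happy",
--     "Scared": "happy", "Anxious": "happy",
-- }
--
-- def negated_feeling_str(emotion: str) -> str:
--     return _OPPOSITE.get(emotion, "unknown")
-- ===== Notes on version B (the rewrite author's own statement) =====
-- stated objective: simpler
-- what changed: Replaces the per-category loop with inner membership test and branch dispatch by one flat precomputed word-to-opposite dict and a single .get with the default fallback string.
import Mathlib
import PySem

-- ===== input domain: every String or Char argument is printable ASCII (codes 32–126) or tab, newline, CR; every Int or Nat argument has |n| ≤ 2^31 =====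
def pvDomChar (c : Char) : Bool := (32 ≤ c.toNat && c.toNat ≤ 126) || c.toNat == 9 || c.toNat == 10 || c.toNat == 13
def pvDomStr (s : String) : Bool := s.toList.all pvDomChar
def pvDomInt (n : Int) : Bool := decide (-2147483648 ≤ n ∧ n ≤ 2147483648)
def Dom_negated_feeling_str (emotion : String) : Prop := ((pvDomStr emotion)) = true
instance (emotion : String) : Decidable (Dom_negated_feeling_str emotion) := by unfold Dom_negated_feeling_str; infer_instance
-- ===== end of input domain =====

-- B replaces A's per-category loop and branch dispatch by one flat word→opposite table looked up once (objective: simpler).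

-- ===== PORT A =====
-- the loop body: for each (category, emotion_list), membership test then the branch dispatch,
-- falling through to the next iteration otherwise; after the loop, "unknown"
def pvCatLoop (emotion : String) : List (String × List String) → String
  | [] => "unknown"
  | (category, emotion_list) :: rest =>
    if emotion ∈ emotion_list then
      if category = "happy" then "sad"
      else if category = "angry" then "chill"
      else if category = "sad" then "happy"
      else pvCatLoop emotion rest
    else pvCatLoop emotion rest

def negated_feeling_str (emotion : String) : String :=
  let emotions_categories : List (String × List String) :=
    [("happy", ["euphoric", "loving", "happy", "Euphoric", "Loving", "Happy"]),
     ("angry", ["furious", "frustrated", "Furious", "Frustrated"]),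
     ("sad", ["horrified", "disappointed", "useless", "regretful", "dejected", "unhappy",
              "scared", "anxious", "Horrified", "Disappointed", "Useless", "Regretful",
              "Dejected", "Unhappy", "Scared", "Anxious"])]
  pvCatLoop emotion emotions_categories

-- ===== PORT B =====
def pvOpposite : PySem.Dict String String :=
  PySem.Dict.ofList
    [("euphoric", "sad"), ("loving", "sad"), ("happy", "sad"),
     ("Euphoric", "sad"), ("Loving", "sad"), ("Happy", "sad"),
     ("furious", "chill"), ("frustrated", "chill"),
     ("Furious", "chill"), ("Frustrated", "chill"),
     ("horrified", "happy"), ("disappointed", "happy"), ("useless", "happy"),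
     ("regretful", "happy"), ("dejected", "happy"), ("unhappy", "happy"),
     ("scared", "happy"), ("anxious", "happy"),
     ("Horrified", "happy"), ("Disappointed", "happy"), ("Useless", "happy"),
     ("Regretful", "happy"), ("Dejected", "happy"), ("Unhappy", "happy"),
     ("Scared", "happy"), ("Anxious", "happy")]

def negated_feeling_str_alt (emotion : String) : String :=
  PySem.Dict.getD pvOpposite emotion "unknown"

-- ===== PRECONDITION & SPEC =====
def Spec_negated_feeling_str (emotion : String) (out : String) : Prop := out = negated_feeling_str_alt emotion
instance (emotion : String) (out : String) : Decidable (Spec_negated_feeling_str emotion out) := by unfold Spec_negated_feeling_str; infer_instance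

-- ===== CLAIM (what is proved, stated in full; the proofs are below) =====
def Claim_equal_negated_feeling_str : Prop := ∀ (emotion : String), Dom_negated_feeling_str emotion → Spec_negated_feeling_str emotion (negated_feeling_str emotion)

-- ===== LEMMAS AND PROOFS =====

-- ===== VERDICT (by name: the statement is the Claim_ definition above) =====
theorem negated_feeling_str_spec : Claim_equal_negated_feeling_str := by
  intro emotion _
  unfold Spec_negated_feeling_str negated_feeling_str negated_feeling_str_alt
  simp only [pvCatLoop, List.mem_cons, List.not_mem_nil, or_false, String.reduceEq, reduceIte]
  rw [show pvOpposite = PySem.Dict.mk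
    [("euphoric", "sad"), ("loving", "sad"), ("happy", "sad"),
     ("Euphoric", "sad"), ("Loving", "sad"), ("Happy", "sad"),
     ("furious", "chill"), ("frustrated", "chill"),
     ("Furious", "chill"), ("Frustrated", "chill"),
     ("horrified", "happy"), ("disappointed", "happy"), ("useless", "happy"),
     ("regretful", "happy"), ("dejected", "happy"), ("unhappy", "happy"),
     ("scared", "happy"), ("anxious", "happy"),
     ("Horrified", "happy"), ("Disappointed", "happy"), ("Useless", "happy"),
     ("Regretful", "happy"), ("Dejected", "happy"), ("Unhappy", "happy"),
     ("Scared", "happy"), ("Anxious", "happy")] from by decide]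
  split_ifs with h1 h2 h3
  · obtain (rfl | rfl | rfl | rfl | rfl | rfl) := h1 <;> decide
  · obtain (rfl | rfl | rfl | rfl) := h2 <;> decide
  · obtain (rfl|rfl|rfl|rfl|rfl|rfl|rfl|rfl|rfl|rfl|rfl|rfl|rfl|rfl|rfl|rfl) := h3 <;> decide
  · rw [not_or, not_or, not_or, not_or, not_or] at h1
    rw [not_or, not_or, not_or] at h2
    rw [not_or, not_or, not_or, not_or, not_or, not_or, not_or, not_or, not_or,
        not_or, not_or, not_or, not_or, not_or, not_or] at h3
    obtain ⟨n1, n2, n3, n4, n5, n6⟩ := h1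
    obtain ⟨n7, n8, n9, n10⟩ := h2
    obtain ⟨n11, n12, n13, n14, n15, n16, n17, n18, n19, n20, n21, n22, n23, n24, n25, n26⟩ := h3
    simp only [PySem.Dict.getD, PySem.Dict.get?_mk_cons, beq_iff_eq]
    rw [if_neg (Ne.symm n1)]
    rw [if_neg (Ne.symm n2)]
    rw [if_neg (Ne.symm n3)]
    rw [if_neg (Ne.symm n4)]
    rw [if_neg (Ne.symm n5)]
    rw [if_neg (Ne.symm n6)]
    rw [if_neg (Ne.symm n7)]
    rw [if_neg (Ne.symm n8)]
    rw [if_neg (Ne.symm n9)]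
    rw [if_neg (Ne.symm n10)]
    rw [if_neg (Ne.symm n11)]
    rw [if_neg (Ne.symm n12)]
    rw [if_neg (Ne.symm n13)]
    rw [if_neg (Ne.symm n14)]
    rw [if_neg (Ne.symm n15)]
    rw [if_neg (Ne.symm n16)]
    rw [if_neg (Ne.symm n17)]
    rw [if_neg (Ne.symm n18)]
    rw [if_neg (Ne.symm n19)]
    rw [if_neg (Ne.symm n20)]
    rw [if_neg (Ne.symm n21)]
    rw [if_neg (Ne.symm n22)]
    rw [if_neg (Ne.symm n23)]
    rw [if_neg (Ne.symm n24)]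
    rw [if_neg (Ne.symm n25)]
    rw [if_neg (Ne.symm n26)]
    simp [PySem.Dict.get?]
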